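-- pv_equiv track=rewrite | github.com/natanzt1/TextSummarization | summarization/src/summarization_function.py | function_type_freq
-- ===== SOURCE A (Python) =====
-- def function_type_freq(type, words):
--     k = 0
--     type_freq = []
--     count_type = len(type)
--     for k in range(count_type):
--         type_freq.append(0)
--
--     i = 0
--     for a_type in type:
--         for word in words:
--             if a_type == word:
--                 type_freq[i] += 1
--         i += 1
--
--     return type_freq
-- ===== SOURCE B (Python) =====
-- def function_type_freq(type, words):
--     counts = {}
--     for w in words:
--         counts[w] = counts.get(w, 0) + 1
--     return [counts.get(t, 0) for t in type]
-- ===== Notes on version B (the rewrite author's own statement) =====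
-- stated objective: faster
-- what changed: Replaced the nested gather loop over type x words by a single-pass word counter dict followed by one lookup per type entry.
import Mathlib
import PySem

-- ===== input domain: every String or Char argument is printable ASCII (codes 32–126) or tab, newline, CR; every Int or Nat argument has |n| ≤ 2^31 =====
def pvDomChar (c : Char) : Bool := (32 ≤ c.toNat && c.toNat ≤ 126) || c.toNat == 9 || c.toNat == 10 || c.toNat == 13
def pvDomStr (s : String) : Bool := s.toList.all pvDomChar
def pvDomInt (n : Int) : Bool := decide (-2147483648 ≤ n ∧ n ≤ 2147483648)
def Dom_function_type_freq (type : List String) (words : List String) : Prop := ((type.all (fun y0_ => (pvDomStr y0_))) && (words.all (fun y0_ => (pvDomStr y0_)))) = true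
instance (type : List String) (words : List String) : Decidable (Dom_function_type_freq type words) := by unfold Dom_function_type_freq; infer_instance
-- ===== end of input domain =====

-- B replaces A's nested gather loop (for each type entry scan all words) by one pass over
-- words building a counter dict and then one lookup per type entry (asymptotically faster).


-- ===== PORT A =====
def function_type_freq (type : List String) (words : List String) : List Int :=
  -- count_type = len(type); for k in range(count_type): type_freq.append(0)
  let count_type : Int := (type.length : Int)
  let type_freq : List Int :=
    (PySem.List.pyRange 0 count_type 1).foldl (fun acc _ => acc ++ [(0 : Int)]) []
  -- i = 0; for a_type in type: for word in words: if a_type == word: type_freq[i] += 1; i += 1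
  -- (i is always 0 ≤ i < len(type_freq) here, so type_freq[i] += 1 is List.set i.toNat)
  let st :=
    type.foldl (fun (st : List Int × Int) a_type =>
      let tf := words.foldl (fun tf word =>
        if a_type == word then tf.set st.2.toNat (tf.getD st.2.toNat 0 + 1) else tf) st.1
      (tf, st.2 + 1)) (type_freq, 0)
  st.1

-- ===== PORT B =====
def function_type_freq_alt (type : List String) (words : List String) : List Int :=
  let counts : PySem.Dict String Int :=
    words.foldl (fun d w => d.insert w (d.getD w 0 + 1)) PySem.Dict.empty
  type.map (fun t => counts.getD t 0)

-- ===== PRECONDITION & SPEC =====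
def Spec_function_type_freq (type : List String) (words : List String) (out : List Int) : Prop := out = function_type_freq_alt type words
instance (type : List String) (words : List String) (out : List Int) : Decidable (Spec_function_type_freq type words out) := by unfold Spec_function_type_freq; infer_instance

-- ===== CLAIM (what is proved, stated in full; the proofs are below) =====
def Claim_equal_function_type_freq : Prop := ∀ (type : List String) (words : List String), Dom_function_type_freq type words → Spec_function_type_freq type words (function_type_freq type words)

-- ===== LEMMAS AND PROOFS =====

-- A's inner loop over words only touches index i: it adds (count of a_type in words) there.
lemma inner_loop_eq (a_type : String) (words : List String) (tf : List Int) (i : Nat) :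
    words.foldl (fun tf word => if a_type == word then tf.set i (tf.getD i 0 + 1) else tf) tf
      = tf.set i (tf.getD i 0 + (words.count a_type : Int)) := by
  induction words generalizing tf with
  | nil =>
    simp only [List.foldl_nil, List.count_nil, Nat.cast_zero, add_zero]
    by_cases h : i < tf.length
    · simp [List.getD, List.getElem?_eq_getElem h, List.set_getElem_self]
    · exact (List.set_eq_of_length_le (by omega)).symm
  | cons w ws ih =>
    simp only [List.foldl_cons, List.count_cons]
    by_cases h : a_type == w
    · rw [if_pos h, ih]
      have he : w = a_type := (beq_iff_eq.mp h).symm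
      by_cases hlt : i < tf.length
      · simp only [List.getD, List.getElem?_eq_getElem hlt, Option.getD_some,
          List.getElem?_set_self (by simpa using hlt), List.set_set, he,
          beq_self_eq_true, if_true]
        congr 1
        push_cast
        ring
      · have hle : tf.length ≤ i := Nat.le_of_not_lt hlt
        simp only [List.set_eq_of_length_le hle]
    · rw [if_neg h, ih]
      have he : ¬ (w = a_type) := fun e => h (by simp [e])
      simp [he]

-- A's outer loop, characterised: with the first `done.length` counts finished and zeros after.
lemma outer_loop_eq (words : List String) (ts : List String) (done : List Int) :
    (ts.foldl (fun (st : List Int × Int) a_type =>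
        let tf := words.foldl (fun tf word =>
          if a_type == word then tf.set st.2.toNat (tf.getD st.2.toNat 0 + 1) else tf) st.1
        (tf, st.2 + 1)) (done ++ List.replicate ts.length 0, (done.length : Int))).1
      = done ++ ts.map (fun t => (words.count t : Int)) := by
  induction ts generalizing done with
  | nil => simp
  | cons t ts ih =>
    simp only [List.foldl_cons, List.length_cons, List.replicate_succ, List.map_cons]
    rw [show ((done.length : Int)).toNat = done.length by simp]
    rw [inner_loop_eq]
    have hset : (done ++ (0 : Int) :: List.replicate ts.length 0).set done.length
        ((done ++ (0 : Int) :: List.replicate ts.length 0).getD done.length 0 + (words.count t : Int))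
        = (done ++ [(words.count t : Int)]) ++ List.replicate ts.length 0 := by
      simp
    rw [hset]
    have hlen : (done.length : Int) + 1 = (((done ++ [(words.count t : Int)]).length : Int)) := by
      simp
    rw [hlen, ih (done ++ [(words.count t : Int)])]
    simp

theorem function_type_freq_spec : Claim_equal_function_type_freq := by
  intro type words _
  unfold Spec_function_type_freq function_type_freq function_type_freq_alt
  simp only []
  have hz : ((PySem.List.pyRange 0 (type.length : Int) 1).foldl (fun acc _ => acc ++ [(0:Int)]) [])
      = List.replicate type.length 0 := by
    rw [PySem.List.foldl_append_singleton_eq_map]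
    simp [List.map_const', PySem.List.length_pyRange_one]
  rw [hz]
  have := outer_loop_eq words type ([] : List Int)
  simp only [List.nil_append, List.length_nil, Nat.cast_zero] at this
  rw [this]
  apply List.map_congr_left
  intro t _
  rw [PySem.Dict.getD_foldl_insert_add_one]
  simp
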